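-- pv_equiv track=rewrite | github.com/AhaiMk01/patchright-cli | src/patchright_cli/snapshot.py | _yaml_escape
-- ===== SOURCE A (Python) =====
-- def _yaml_escape(s: str) -> str:
--     if not s:
--         return '""'
--     if any(
--         c in s
--         for c in (
--             "\\",
--             ":",
--             "#",
--             "'",
--             '"',
--             "\n",
--             "\r",
--             "[",
--             "]",
--             "{",
--             "}",
--             ",",
--             "&",
--             "*",
--             "?",
--             "|",
--             "-",
--             "<",
--             ">",
--             "=",
--             "!",
--             "%",
--             "@",
--             "`",
--         )
--     ):
--         escaped = s.replace("\\", "\\\\").replace('"', '\\"').replace("\n", "\\n").replace("\r", "\\r")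
--         return f'"{escaped}"'
--     return s
-- ===== SOURCE B (Python) =====
-- def _yaml_escape(s: str) -> str:
--     if not s:
--         return '""'
--     esc = {'\\': '\\\\', '"': '\\"', '\n': '\\n', '\r': '\\r'}
--     triggers = "\\:#'\"\n\r[]{},&*?|-<>=!%@`"
--     buf = []
--     needs_quote = False
--     for c in s:
--         buf.append(esc.get(c, c))
--         if c in triggers:
--             needs_quote = True
--     return '"' + ''.join(buf) + '"' if needs_quote else s
-- ===== Notes on version B (the rewrite author's own statement) =====
-- stated objective: alternative
-- what changed: Replaced A's 24 separate substring-membership scans plus four chained .replace passes with a single character-by-character loop that builds the escaped buffer and sets the needs-quote flag in one traversal.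
import Mathlib
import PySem

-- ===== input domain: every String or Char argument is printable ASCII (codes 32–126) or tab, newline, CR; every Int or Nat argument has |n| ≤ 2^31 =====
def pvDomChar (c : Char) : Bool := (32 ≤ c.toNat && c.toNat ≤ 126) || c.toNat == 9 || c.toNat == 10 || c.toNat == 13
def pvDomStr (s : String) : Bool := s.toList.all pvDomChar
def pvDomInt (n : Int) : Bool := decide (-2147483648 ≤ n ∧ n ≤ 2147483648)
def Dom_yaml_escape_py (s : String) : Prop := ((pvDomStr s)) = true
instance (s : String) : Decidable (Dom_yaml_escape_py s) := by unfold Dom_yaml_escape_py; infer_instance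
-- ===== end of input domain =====

-- B fuses A's 24 substring-membership scans and four .replace passes into one
-- character-by-character pass maintaining the escaped buffer and a needs-quote flag
-- (objective: alternative single-pass decomposition; return value proved equal).


-- ===== PORT A =====
def yaml_escape_py (s : String) : String :=
  if s = "" then "\"\""
  else if PySem.Str.isIn "\\" s || PySem.Str.isIn ":" s || PySem.Str.isIn "#" s ||
          PySem.Str.isIn "'" s || PySem.Str.isIn "\"" s || PySem.Str.isIn "\n" s ||
          PySem.Str.isIn "\r" s || PySem.Str.isIn "[" s || PySem.Str.isIn "]" s ||
          PySem.Str.isIn "{" s || PySem.Str.isIn "}" s || PySem.Str.isIn "," s ||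
          PySem.Str.isIn "&" s || PySem.Str.isIn "*" s || PySem.Str.isIn "?" s ||
          PySem.Str.isIn "|" s || PySem.Str.isIn "-" s || PySem.Str.isIn "<" s ||
          PySem.Str.isIn ">" s || PySem.Str.isIn "=" s || PySem.Str.isIn "!" s ||
          PySem.Str.isIn "%" s || PySem.Str.isIn "@" s || PySem.Str.isIn "`" s then
    let escaped :=
      PySem.Str.replace
        (PySem.Str.replace
          (PySem.Str.replace (PySem.Str.replace s "\\" "\\\\") "\"" "\\\"")
          "\n" "\\n")
        "\r" "\\r"
    "\"" ++ escaped ++ "\""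
  else s

-- ===== PORT B =====
-- the esc dict of Source B as a function (get with default = the char itself)
def pvEsc (c : Char) : List Char :=
  if c = '\\' then ['\\', '\\']
  else if c = '"' then ['\\', '"']
  else if c = '\n' then ['\\', 'n']
  else if c = '\r' then ['\\', 'r']
  else [c]

def pvTriggers : List Char := "\\:#'\"\n\r[]{},&*?|-<>=!%@`".toList

def yaml_escape_py_alt (s : String) : String :=
  if s = "" then "\"\""
  else
    let st := s.toList.foldl
      (fun (st : List Char × Bool) c =>
        (st.1 ++ pvEsc c, st.2 || decide (c ∈ pvTriggers))) ([], false)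
    if st.2 then "\"" ++ String.ofList st.1 ++ "\"" else s

-- ===== PRECONDITION & SPEC =====
def Spec_yaml_escape_py (s : String) (out : String) : Prop := out = yaml_escape_py_alt s
instance (s : String) (out : String) : Decidable (Spec_yaml_escape_py s out) := by unfold Spec_yaml_escape_py; infer_instance

-- ===== CLAIM (what is proved, stated in full; the proofs are below) =====
def Claim_equal_yaml_escape_py : Prop := ∀ (s : String), Dom_yaml_escape_py s → Spec_yaml_escape_py s (yaml_escape_py s)

-- ===== LEMMAS AND PROOFS =====

-- B's loop: the fold accumulates the flat-mapped escape and the any-trigger flag.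
theorem pv_foldl_char (l : List Char) (buf : List Char) (b : Bool) :
    l.foldl (fun (st : List Char × Bool) c =>
      (st.1 ++ pvEsc c, st.2 || decide (c ∈ pvTriggers))) (buf, b)
    = (buf ++ l.flatMap pvEsc, b || l.any (fun c => decide (c ∈ pvTriggers))) := by
  induction l generalizing buf b with
  | nil => simp
  | cons c t ih => simp [List.foldl_cons, ih, Bool.or_assoc]

-- Python str.replace with a single-character pattern is a per-character flatMap.
theorem pv_replace_go_single (a : Char) (new : List Char) :
    ∀ (l : List Char) (fuel : Nat) (acc : List Char), l.length ≤ fuel →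
    PySem.Chars.replace.go [a] new fuel l acc
      = acc.reverse ++ l.flatMap (fun c => if c = a then new else [c]) := by
  intro l
  induction l with
  | nil =>
    intro fuel acc _
    cases fuel <;> simp [PySem.Chars.replace.go]
  | cons c t ih =>
    intro fuel acc h
    cases fuel with
    | zero => simp at h
    | succ n =>
      simp only [PySem.Chars.replace.go]
      by_cases hc : c = a
      · subst hc
        have hpre : List.isPrefixOf [c] (c :: t) = true := by
          simp [List.isPrefixOf]
        simp only [hpre, if_true]
        rw [show List.drop [c].length (c :: t) = t from rfl]
        rw [ih _ _ (by simpa using Nat.le_of_succ_le_succ h)]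
        simp
      · have hpre : List.isPrefixOf [a] (c :: t) = false := by
          simp [List.isPrefixOf]; exact fun h' => (hc h'.symm).elim
        simp only [hpre, Bool.false_eq_true, if_false]
        rw [ih _ _ (by simpa using Nat.le_of_succ_le_succ h)]
        simp [hc]

theorem pv_replace_single (a : Char) (new l : List Char) :
    PySem.Chars.replace l [a] new = l.flatMap (fun c => if c = a then new else [c]) := by
  simp [PySem.Chars.replace]
  rw [pv_replace_go_single a new l l.length [] (le_refl _)]
  simp

-- the four chained replaces of A equal B's single per-character escape
theorem pv_chain_eq (l : List Char) :
    PySem.Chars.replace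
      (PySem.Chars.replace
        (PySem.Chars.replace (PySem.Chars.replace l ['\\'] ['\\', '\\']) ['"'] ['\\', '"'])
        ['\n'] ['\\', 'n'])
      ['\r'] ['\\', 'r'] = l.flatMap pvEsc := by
  simp only [pv_replace_single, List.flatMap_assoc]
  apply List.flatMap_congr
  intro c _
  by_cases h1 : c = '\\' <;> by_cases h2 : c = '"' <;> by_cases h3 : c = '\n' <;>
    by_cases h4 : c = '\r' <;> simp_all [pvEsc]

theorem pv_isIn_single (c : Char) (cs : List Char) :
    PySem.Chars.isIn [c] cs = decide (c ∈ cs) := by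
  rw [Bool.eq_iff_iff, PySem.Chars.isIn_iff_infix]
  simp only [decide_eq_true_eq]
  constructor
  · intro h; exact h.subset (by simp)
  · intro h
    obtain ⟨p, q, rfl⟩ := List.append_of_mem h
    exact ⟨p, q, by simp⟩

-- swap the two any-quantifiers: scan the triggers for membership in s
-- = scan s for membership in the triggers
theorem pv_any_comm (l m : List Char) :
    l.any (fun a => decide (a ∈ m)) = m.any (fun b => decide (b ∈ l)) := by
  rw [Bool.eq_iff_iff]
  simp only [List.any_eq_true, decide_eq_true_eq]
  exact ⟨fun ⟨a, h1, h2⟩ => ⟨a, h2, h1⟩, fun ⟨a, h1, h2⟩ => ⟨a, h2, h1⟩⟩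

theorem pv_cond_eq (s : String) :
    (PySem.Str.isIn "\\" s || PySem.Str.isIn ":" s || PySem.Str.isIn "#" s ||
     PySem.Str.isIn "'" s || PySem.Str.isIn "\"" s || PySem.Str.isIn "\n" s ||
     PySem.Str.isIn "\r" s || PySem.Str.isIn "[" s || PySem.Str.isIn "]" s ||
     PySem.Str.isIn "{" s || PySem.Str.isIn "}" s || PySem.Str.isIn "," s ||
     PySem.Str.isIn "&" s || PySem.Str.isIn "*" s || PySem.Str.isIn "?" s ||
     PySem.Str.isIn "|" s || PySem.Str.isIn "-" s || PySem.Str.isIn "<" s ||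
     PySem.Str.isIn ">" s || PySem.Str.isIn "=" s || PySem.Str.isIn "!" s ||
     PySem.Str.isIn "%" s || PySem.Str.isIn "@" s || PySem.Str.isIn "`" s)
    = s.toList.any (fun c => decide (c ∈ pvTriggers)) := by
  rw [pv_any_comm]
  have : ∀ sub : String, PySem.Str.isIn sub s = PySem.Chars.isIn sub.toList s.toList := by
    intro sub; rfl
  simp only [this]
  show _ = (pvTriggers.any fun b => decide (b ∈ s.toList))
  simp [pvTriggers, List.any_cons, pv_isIn_single, Bool.or_assoc]

-- ===== VERDICT (by name: the statement is the Claim_ definition above) =====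
theorem yaml_escape_py_spec : Claim_equal_yaml_escape_py := by
  intro s _
  unfold Spec_yaml_escape_py yaml_escape_py yaml_escape_py_alt
  rcases eq_or_ne s "" with hs | hs
  · subst hs; rfl
  · rw [if_neg hs, if_neg hs]
    simp only [pv_foldl_char, pv_cond_eq, Bool.false_or, List.nil_append]
    by_cases hc : s.toList.any (fun c => decide (c ∈ pvTriggers)) = true
    · simp only [hc, if_true]
      have hrep : PySem.Str.replace
          (PySem.Str.replace
            (PySem.Str.replace (PySem.Str.replace s "\\" "\\\\") "\"" "\\\"")
            "\n" "\\n")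
          "\r" "\\r" = String.ofList (s.toList.flatMap pvEsc) := by
        simp only [PySem.Str.replace, String.toList_ofList]
        rw [show ("\\" : String).toList = ['\\'] from rfl,
            show ("\\\\" : String).toList = ['\\', '\\'] from rfl,
            show ("\"" : String).toList = ['"'] from rfl,
            show ("\\\"" : String).toList = ['\\', '"'] from rfl,
            show ("\n" : String).toList = ['\n'] from rfl,
            show ("\\n" : String).toList = ['\\', 'n'] from rfl,
            show ("\r" : String).toList = ['\r'] from rfl,
            show ("\\r" : String).toList = ['\\', 'r'] from rfl]
        rw [pv_chain_eq]
      rw [hrep]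
    · simp [hc]
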